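-- pv_equiv track=rewrite | github.com/miliar/Code_Jam_Webscraper | Solutions_python/Problem_155/830.py | solve
-- ===== SOURCE A (Python) =====
-- def solve(n, audience):
--     sum = 0
--     friends = 0
--     for (i, x) in enumerate(audience):
--         newX = 0
--         if i > sum:
--             newX = i - sum
--             friends = friends + newX
--
--         sum += newX + x
--
--     return friends
-- ===== SOURCE B (Python) =====
-- def solve(n, audience):
--     prefix = [0]
--     for x in audience:
--         prefix.append(prefix[-1] + x)
--     return max((i - prefix[i] for i in range(len(audience))), default=0)
-- ===== Notes on version B (the rewrite author's own statement) =====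
-- stated objective: simpler
-- what changed: Replaces A's online simulation (mutable standing count that mixes in invited friends, plus a branch) by the closed form max(0, max_k (k - prefix_sum_k)) computed in two staged passes: first plain prefix sums of the audience alone, then one max over the deficits.
import Mathlib
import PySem

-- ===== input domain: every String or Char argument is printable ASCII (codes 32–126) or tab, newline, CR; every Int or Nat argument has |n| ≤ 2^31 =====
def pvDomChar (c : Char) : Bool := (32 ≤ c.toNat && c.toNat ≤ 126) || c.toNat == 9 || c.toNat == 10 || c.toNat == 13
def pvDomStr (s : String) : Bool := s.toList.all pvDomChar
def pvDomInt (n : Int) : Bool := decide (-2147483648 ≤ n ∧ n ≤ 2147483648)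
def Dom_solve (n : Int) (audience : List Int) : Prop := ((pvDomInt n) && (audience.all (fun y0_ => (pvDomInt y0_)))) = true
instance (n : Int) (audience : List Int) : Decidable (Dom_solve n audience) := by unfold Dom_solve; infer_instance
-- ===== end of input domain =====

-- B replaces A's online simulation (standing count mixing in invited friends, with a branch)
-- by the closed form max(0, max_k (k - prefix_sum_k)) in two staged passes; objective: simpler.


-- ===== PORT A =====
-- A's for-loop over enumerate(audience), carrying (sum, friends) and the index i
def solveLoop (l : List Int) (i : Int) (s f : Int) : Int :=
  match l with
  | [] => f
  | x :: rest =>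
    let newX : Int := if i > s then i - s else 0
    let f' : Int := if i > s then f + (i - s) else f
    solveLoop rest (i + 1) (s + newX + x) f'

def solve (n : Int) (audience : List Int) : Int :=
  solveLoop audience 0 0 0

-- ===== PORT B =====
-- B's first pass: prefix = [0]; for x in audience: prefix.append(prefix[-1] + x)
def buildPrefix (l : List Int) (acc : List Int) : List Int :=
  match l with
  | [] => acc
  | x :: rest => buildPrefix rest (acc ++ [acc.getLastD 0 + x])

-- B's second pass: max((i - prefix[i] for i in range(len(audience))), default=0)
def solve_alt (n : Int) (audience : List Int) : Int :=
  let pref := buildPrefix audience [0]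
  let cands := (List.range audience.length).map (fun (i : Nat) => (i : Int) - pref.getD i 0)
  match PySem.List.max? cands (fun y => y) with
  | none => 0
  | some m => m

-- ===== PRECONDITION & SPEC =====
def Spec_solve (n : Int) (audience : List Int) (out : Int) : Prop := out = solve_alt n audience
instance (n : Int) (audience : List Int) (out : Int) : Decidable (Spec_solve n audience out) := by unfold Spec_solve; infer_instance

-- ===== CLAIM (what is proved, stated in full; the proofs are below) =====
def Claim_equal_solve : Prop := ∀ (n : Int) (audience : List Int), Dom_solve n audience → Spec_solve n audience (solve n audience)

-- ===== LEMMAS AND PROOFS =====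

-- the list of deficits i - S_i over plain prefix sums (no friends mixed in)
def defs (l : List Int) (i s : Int) : List Int :=
  match l with
  | [] => []
  | x :: rest => (i - s) :: defs rest (i + 1) (s + x)

-- plain prefix-sum tail: scan s l = [s+x0, s+x0+x1, ...]
def scan (s : Int) (l : List Int) : List Int :=
  match l with
  | [] => []
  | x :: rest => (s + x) :: scan (s + x) rest

-- A's loop, with its sum split into plain prefix sum S and friends f, is a running max over the deficits
theorem solveLoop_eq_foldl_max (l : List Int) (i S f : Int) :
    solveLoop l i (S + f) f = (defs l i S).foldl max f := by
  induction l generalizing i S f with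
  | nil => simp [solveLoop, defs]
  | cons x rest ih =>
    simp only [solveLoop, defs, List.foldl_cons]
    by_cases h : i > S + f
    · simp only [h, if_pos]
      have hf : f + (i - (S + f)) = max f (i - S) := by omega
      have hs : (S + f) + (i - (S + f)) + x = (S + x) + max f (i - S) := by omega
      rw [hf, hs, ih]
    · simp only [h, if_neg, not_false_iff]
      have hm : max f (i - S) = f := by omega
      have hs : (S + f) + 0 + x = (S + x) + f := by ring
      rw [hs, ih, hm]

theorem buildPrefix_scan (l : List Int) (acc : List Int) (y : Int) :
    buildPrefix l (acc ++ [y]) = acc ++ [y] ++ scan y l := by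
  induction l generalizing acc y with
  | nil => simp [buildPrefix, scan]
  | cons x rest ih =>
    simp only [buildPrefix, scan]
    have hl : (acc ++ [y]).getLastD 0 = y := by simp
    rw [hl]
    have := ih (acc ++ [y]) (y + x)
    simp only [List.append_assoc] at *
    rw [this]
    simp

theorem range_map_defs (l : List Int) (s i0 : Int) :
    (List.range l.length).map (fun (k : Nat) => (i0 + (k : Int)) - (s :: scan s l).getD k 0) = defs l i0 s := by
  induction l generalizing s i0 with
  | nil => simp [defs]
  | cons x rest ih =>
    rw [List.length_cons, List.range_succ_eq_map, List.map_cons, List.map_map]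
    simp only [defs]
    congr 1
    · simp
    · rw [← ih (s + x) (i0 + 1)]
      apply List.map_congr_left
      intro k _
      simp only [Function.comp, scan, List.getD_cons_succ]
      congr 1
      push_cast; ring

-- ===== VERDICT (by name: the statement is the Claim_ definition above) =====
theorem solve_spec : Claim_equal_solve := by
  intro n audience _
  unfold Spec_solve solve solve_alt
  have hpre : buildPrefix audience [0] = (0 : Int) :: scan 0 audience := by
    simpa using buildPrefix_scan audience [] 0
  simp only [hpre]
  have hmap : (List.range audience.length).map
      (fun (i : Nat) => (i : Int) - ((0 : Int) :: scan 0 audience).getD i 0) = defs audience 0 0 := by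
    rw [← range_map_defs audience 0 0]
    apply List.map_congr_left
    intro k _
    simp
  simp only [hmap]
  cases audience with
  | nil => simp [solveLoop, defs, PySem.List.max?]
  | cons x rest =>
    simp only [defs]
    rw [PySem.List.max?_id_cons]
    have h00 : (0 : Int) - 0 = 0 := by ring
    rw [h00]
    have := solveLoop_eq_foldl_max (x :: rest) 0 0 0
    simpa [defs] using this
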